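-- pv_equiv track=rewrite | github.com/ichitenfont/I.MingWebfont | .github/workflows/webfont-subsetter.py | merge_char_range_to_css_unicode_list
-- ===== SOURCE A (Python) =====
-- def merge_char_range_to_css_unicode_list(grouped_list):
--     MAX_RANGE_SIZE_LIMIT = 0x80
--
--     # merge list to CSS Unicode style, eg U+20,U+31-3F
--     output_range = []
--     seen_index = []
--     for index, (start, end) in enumerate(grouped_list):
--         if index in seen_index:
--             continue
--         seen_index.append(index)
--
--         current_size = end - start + 1
--         current_merged_range = [(start, end)]
--         next_index = index + 1
--         if current_size < MAX_RANGE_SIZE_LIMIT: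
--             # try to add until size 0x80
--             while current_size < MAX_RANGE_SIZE_LIMIT and next_index < len(grouped_list):
--                 next_start, next_end = grouped_list[next_index]
--                 if current_size + next_end - next_start + 1 < MAX_RANGE_SIZE_LIMIT:
--                     current_merged_range.append((next_start, next_end))
--                     current_size = current_size + next_end - next_start + 1
--                     seen_index.append(next_index)
--                     next_index += 1
--                 else:
--                     break
--             output_range.append(current_merged_range)
--         elif current_size > MAX_RANGE_SIZE_LIMIT:
--             # too large, insert directly
--             # break start up to 0x??7F
--             first_end = start + (MAX_RANGE_SIZE_LIMIT - (start % MAX_RANGE_SIZE_LIMIT)) - 1 # 0x7F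
--             output_range.append([(start, first_end)])
--
--             current_value = first_end + 1 # 0x80
--             next_value = first_end + MAX_RANGE_SIZE_LIMIT # 0xFF
--             while next_value <= end:
--                 output_range.append([(current_value, next_value)])
--                 current_value = next_value + 1 # 0x00
--                 next_value = next_value + MAX_RANGE_SIZE_LIMIT # 0x7F
--
--             if next_value != end:
--                 output_range.append([(current_value, end)])
--         else:
--             # just add the range
--             output_range.append(current_merged_range)
--     return output_range
-- ===== SOURCE B (Python) =====
-- def merge_char_range_to_css_unicode_list(grouped_list):
--     LIMIT = 0x80
--
--     def split_big(start, end):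
--         # closed-form chunking of an over-large range: the head piece up to the
--         # next LIMIT boundary, k full LIMIT-sized chunks, then the tail piece
--         first_end = start - start % LIMIT + LIMIT - 1
--         k = (end - first_end) // LIMIT
--         pieces = [(start, first_end)]
--         pieces += [(first_end + 1 + t * LIMIT, first_end + (t + 1) * LIMIT) for t in range(k)]
--         pieces.append((first_end + 1 + k * LIMIT, end))
--         return pieces
--
--     # single flat fold: state is (finished groups, currently open group, its size);
--     # each element either joins the open group or closes it and starts/emits anew
--     out = []
--     open_group = []
--     open_size = 0
--     for start, end in grouped_list:
--         size = end - start + 1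
--         if open_group and open_size + size < LIMIT:
--             open_group.append((start, end))
--             open_size += size
--             continue
--         if open_group:
--             out.append(open_group)
--             open_group = []
--         if size < LIMIT:
--             open_group = [(start, end)]
--             open_size = size
--         elif size > LIMIT:
--             for p in split_big(start, end):
--                 out.append([p])
--         else:
--             out.append([(start, end)])
--     if open_group:
--         out.append(open_group)
--     return out
-- ===== Notes on version B (the rewrite author's own statement) =====
-- stated objective: faster
-- what changed: Replaced A's nested loops (enumerate with a seen_index list whose membership test rescans it for every element, plus an inner absorption while-loop) by a single flat fold whose state carries the currently open group and its size, and replaced the chunking while-loop for over-large ranges by a closed-form comprehension over range(k).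
import Mathlib
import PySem

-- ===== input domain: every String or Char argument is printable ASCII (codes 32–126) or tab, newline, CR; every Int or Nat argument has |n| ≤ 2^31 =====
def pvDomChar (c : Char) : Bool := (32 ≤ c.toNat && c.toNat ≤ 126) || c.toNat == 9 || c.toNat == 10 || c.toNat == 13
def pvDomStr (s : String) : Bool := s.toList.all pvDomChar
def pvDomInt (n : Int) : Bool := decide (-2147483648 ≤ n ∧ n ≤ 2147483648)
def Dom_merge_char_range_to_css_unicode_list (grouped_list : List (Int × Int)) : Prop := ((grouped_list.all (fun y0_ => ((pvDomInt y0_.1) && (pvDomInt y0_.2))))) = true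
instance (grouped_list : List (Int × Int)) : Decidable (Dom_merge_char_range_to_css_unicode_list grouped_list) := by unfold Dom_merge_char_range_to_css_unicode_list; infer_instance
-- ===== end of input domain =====

-- B replaces A's nested loops (enumerate + seen_index membership scans + an inner
-- absorption while-loop) by ONE flat fold whose state carries the currently open
-- group and its size, and replaces the chunking while-loop for over-large ranges by
-- a closed-form list comprehension over range(k).  A's loops are ported with a
-- `fuel : Nat` argument as a totality guard only; each call passes sufficient fuel.

-- ===== PORT A =====
-- inner while: try to add following ranges until size 0x80 (marks them in seen_index)
def pvAInner (gl : List (Int × Int)) : Nat → Int → List (Int × Int) → List Int → Int →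
    List (Int × Int) × Int × List Int × Int
  | 0, size, group, seen, ni => (group, size, seen, ni)
  | fuel + 1, size, group, seen, ni =>
    if size < 128 ∧ ni < (gl.length : Int) then
      let p := PySem.List.pyGetD gl ni (0, 0)
      if size + p.2 - p.1 + 1 < 128 then
        pvAInner gl fuel (size + p.2 - p.1 + 1) (group ++ [p]) (seen ++ [ni]) (ni + 1)
      else (group, size, seen, ni)
    else (group, size, seen, ni)

-- inner while of the too-large branch: emit 0x80-sized chunks
def pvABig (endv : Int) : Nat → Int → Int → List (List (Int × Int)) →
    List (List (Int × Int)) × Int × Int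
  | 0, cur, next, out => (out, cur, next)
  | fuel + 1, cur, next, out =>
    if next ≤ endv then pvABig endv fuel (next + 1) (next + 128) (out ++ [[(cur, next)]])
    else (out, cur, next)

-- body of the for-loop over enumerate(grouped_list); state = (output_range, seen_index)
def pvAStep (gl : List (Int × Int)) (st : List (List (Int × Int)) × List Int)
    (p : Int × (Int × Int)) : List (List (Int × Int)) × List Int :=
  if st.2.contains p.1 then st
  else
    let seen := st.2 ++ [p.1]
    let start := p.2.1
    let endv := p.2.2
    let size := endv - start + 1
    let merged := [(start, endv)]
    if size < 128 then
      let r := pvAInner gl gl.length size merged seen (p.1 + 1)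
      (st.1 ++ [r.1], r.2.2.1)
    else if size > 128 then
      let firstEnd := start + (128 - PySem.Int.mod start 128) - 1
      let r := pvABig endv (endv - firstEnd).toNat (firstEnd + 1) (firstEnd + 128)
        (st.1 ++ [[(start, firstEnd)]])
      (if r.2.2 ≠ endv then r.1 ++ [[(r.2.1, endv)]] else r.1, seen)
    else (st.1 ++ [merged], seen)

def merge_char_range_to_css_unicode_list (grouped_list : List (Int × Int)) :
    List (List (Int × Int)) :=
  ((PySem.List.enumerate grouped_list).foldl (pvAStep grouped_list) ([], [])).1

-- ===== PORT B =====
-- split_big: closed-form chunking of an over-large range (head piece, k full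
-- 0x80-sized chunks via a comprehension over range(k), then the tail piece)
def pvSplitBig (start endv : Int) : List (Int × Int) :=
  let firstEnd := start - PySem.Int.mod start 128 + 128 - 1
  let k := PySem.Int.floordiv (endv - firstEnd) 128
  ([(start, firstEnd)] ++ (PySem.List.pyRange 0 k 1).map
      (fun t => (firstEnd + 1 + t * 128, firstEnd + (t + 1) * 128)))
    ++ [(firstEnd + 1 + k * 128, endv)]

-- body of B's single fold; state = (finished groups, open group, open size)
def pvBStep : (List (List (Int × Int)) × List (Int × Int) × Int) → Int × Int →
    List (List (Int × Int)) × List (Int × Int) × Int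
  | (out, og, osz), p =>
    let size := p.2 - p.1 + 1
    if og ≠ [] ∧ osz + size < 128 then (out, og ++ [p], osz + size)
    else
      let out2 := if og ≠ [] then out ++ [og] else out
      if size < 128 then (out2, [p], size)
      else if size > 128 then (out2 ++ (pvSplitBig p.1 p.2).map (fun q => [q]), [], (0 : Int))
      else (out2 ++ [[p]], [], (0 : Int))

-- 'if open_group: out.append(open_group)' at the end of B
def pvBFin (st : List (List (Int × Int)) × List (Int × Int) × Int) :
    List (List (Int × Int)) :=
  if st.2.1 ≠ [] then st.1 ++ [st.2.1] else st.1

def merge_char_range_to_css_unicode_list_alt (grouped_list : List (Int × Int)) :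
    List (List (Int × Int)) :=
  pvBFin (grouped_list.foldl pvBStep ([], [], 0))

-- ===== PRECONDITION & SPEC =====
def Spec_merge_char_range_to_css_unicode_list (grouped_list : List (Int × Int)) (out : List (List (Int × Int))) : Prop := out = merge_char_range_to_css_unicode_list_alt grouped_list
instance (grouped_list : List (Int × Int)) (out : List (List (Int × Int))) : Decidable (Spec_merge_char_range_to_css_unicode_list grouped_list out) := by unfold Spec_merge_char_range_to_css_unicode_list; infer_instance

-- ===== CLAIM (what is proved, stated in full; the proofs are below) =====
def Claim_equal_merge_char_range_to_css_unicode_list : Prop := ∀ (grouped_list : List (Int × Int)), Dom_merge_char_range_to_css_unicode_list grouped_list → Spec_merge_char_range_to_css_unicode_list grouped_list (merge_char_range_to_css_unicode_list grouped_list)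

-- ===== LEMMAS AND PROOFS =====
-- Proof-only intermediate program: a pointer-driven recursion pvBGo, proved equal to
-- A's fold (outer_eq) and to B's flat fold (pvBGo_eq); never used by either port.

-- greedy absorption from pointer i (mirrors A's inner while without seen_index)
def pvBTake (gl : List (Int × Int)) : Nat → Int → Nat → List (Int × Int) × Nat
  | 0, _, i => ([], i)
  | fuel + 1, size, i =>
    if i < gl.length ∧ size + (gl.getD i (0, 0)).2 - (gl.getD i (0, 0)).1 + 1 < 128 then
      let p := gl.getD i (0, 0)
      let r := pvBTake gl fuel (size + p.2 - p.1 + 1) (i + 1)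
      (p :: r.1, r.2)
    else ([], i)

-- fold emitting one singleton group per chunk endpoint
def pvBSplit (s : Int) (ends : List Int) : List (List (Int × Int)) :=
  (ends.foldl (fun (st : List (List (Int × Int)) × Int) e => (st.1 ++ [[(st.2, e)]], e + 1))
    ([], s)).1

-- pointer loop over the whole list
def pvBGo (gl : List (Int × Int)) : Nat → Nat → List (List (Int × Int))
  | 0, _ => []
  | fuel + 1, i =>
    if i < gl.length then
      let p := gl.getD i (0, 0)
      let size := p.2 - p.1 + 1
      if size < 128 then
        let r := pvBTake gl gl.length size (i + 1)
        (p :: r.1) :: pvBGo gl fuel r.2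
      else if size > 128 then
        let firstEnd := p.1 - PySem.Int.mod p.1 128 + 127
        pvBSplit p.1 (PySem.List.pyRange firstEnd (p.2 + 1) 128 ++ [p.2]) ++ pvBGo gl fuel (i + 1)
      else [p] :: pvBGo gl fuel (i + 1)
    else []

theorem pyRange128_nil {a b : Int} (h : b ≤ a) : PySem.List.pyRange a b 128 = [] := by
  rw [PySem.List.pyRange_of_pos a b (by norm_num), if_neg (by omega)]
  simp

theorem pyRange128_cons {a b : Int} (h : a < b) :
    PySem.List.pyRange a b 128 = a :: PySem.List.pyRange (a + 128) b 128 := by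
  rw [PySem.List.pyRange_of_pos a b (by norm_num),
      PySem.List.pyRange_of_pos (a + 128) b (by norm_num), if_pos h]
  by_cases h2 : a + 128 < b
  · rw [if_pos h2]
    have hn : ((b - a + 128 - 1) / 128).toNat = ((b - (a + 128) + 128 - 1) / 128).toNat + 1 := by
      omega
    rw [hn, List.range_succ_eq_map, List.map_cons, List.map_map]
    refine congrArg₂ _ (by simp) ?_
    refine List.map_congr_left fun k _ => ?_
    simp [Function.comp]
    ring
  · rw [if_neg h2]
    have hn : ((b - a + 128 - 1) / 128).toNat = 1 := by omega
    rw [hn]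
    simp

-- the split fold appends its output after its initial accumulator
theorem splitFold_append (ends : List Int) :
    ∀ (out0 : List (List (Int × Int))) (s : Int),
    (ends.foldl (fun st e => (st.1 ++ [[(st.2, e)]], e + 1)) (out0, s)).1
      = out0 ++ (ends.foldl (fun st e => (st.1 ++ [[(st.2, e)]], e + 1)) ([], s)).1 := by
  induction ends with
  | nil => simp
  | cons e t ih =>
      intro out0 s
      simp only [List.foldl_cons, List.nil_append]
      rw [ih (out0 ++ [[(s, e)]]) (e + 1), ih [[(s, e)]] (e + 1)]
      simp

-- A's chunking while-loop plus the final append equals the fold over the range of endpoints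
theorem pvABig_eq (endv : Int) (fuel : Nat) :
    ∀ (c : Int) (out0 : List (List (Int × Int))),
    (endv + 1 - (c + 127)).toNat ≤ fuel →
    (if (pvABig endv fuel c (c + 127) out0).2.2 ≠ endv
     then (pvABig endv fuel c (c + 127) out0).1 ++ [[((pvABig endv fuel c (c + 127) out0).2.1, endv)]]
     else (pvABig endv fuel c (c + 127) out0).1)
    = ((PySem.List.pyRange (c + 127) (endv + 1) 128 ++ [endv]).foldl
        (fun st e => (st.1 ++ [[(st.2, e)]], e + 1)) (out0, c)).1 := by
  induction fuel with
  | zero =>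
      intro c out0 hf
      rw [pyRange128_nil (by omega)]
      simp only [pvABig]
      rw [if_pos (by simp; omega)]
      simp
  | succ fuel ih =>
      intro c out0 hf
      by_cases h : c + 127 ≤ endv
      · rw [pyRange128_cons (by omega : c + 127 < endv + 1)]
        simp only [List.cons_append, List.foldl_cons]
        simp only [pvABig]
        rw [if_pos h]
        have e1 : c + 127 + 1 = c + 128 := by ring
        have e2 : c + 127 + 128 = c + 128 + 127 := by ring
        rw [e1, e2]
        exact ih (c + 128) (out0 ++ [[(c, c + 127)]]) (by omega)
      · simp only [pvABig]
        rw [if_neg h, if_pos (by simp; omega), pyRange128_nil (by omega)]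
        simp

-- A's greedy inner loop, with seen_index = range(k), equals pvBTake at pointer k
theorem pvAInner_eq (gl : List (Int × Int)) (fuel : Nat) :
    ∀ (k : Nat) (size : Int) (group : List (Int × Int)), size < 128 →
    (pvAInner gl fuel size group (PySem.List.pyRange 0 (k : Int) 1) (k : Int)).1
        = group ++ (pvBTake gl fuel size k).1
    ∧ (pvAInner gl fuel size group (PySem.List.pyRange 0 (k : Int) 1) (k : Int)).2.2.1
        = PySem.List.pyRange 0 (((pvBTake gl fuel size k).2 : Nat) : Int) 1
    ∧ (pvAInner gl fuel size group (PySem.List.pyRange 0 (k : Int) 1) (k : Int)).2.2.2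
        = (((pvBTake gl fuel size k).2 : Nat) : Int) := by
  induction fuel with
  | zero =>
      intro k size group _
      simp [pvAInner, pvBTake]
  | succ fuel ih =>
      intro k size group hs
      simp only [pvAInner, pvBTake]
      by_cases hi : k < gl.length
      · rw [if_pos ⟨hs, by exact_mod_cast hi⟩]
        have hget : PySem.List.pyGetD gl ((k : Nat) : Int) (0, 0) = gl.getD k (0, 0) :=
          PySem.List.pyGetD_natCast gl k (0, 0)
        simp only [hget]
        by_cases hc : size + (gl.getD k (0,0)).2 - (gl.getD k (0,0)).1 + 1 < 128
        · rw [if_pos hc, if_pos ⟨hi, hc⟩]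
          have hcast : (((k + 1 : Nat)) : Int) = ((k : Nat) : Int) + 1 := by push_cast; ring
          have hseen : PySem.List.pyRange 0 ((k : Nat) : Int) 1 ++ [((k : Nat) : Int)]
              = PySem.List.pyRange 0 (((k : Nat) : Int) + 1) 1 :=
            (PySem.List.pyRange_one_succ_right (by positivity)).symm
          obtain ⟨h1, h2, h3⟩ := ih (k + 1)
            (size + (gl.getD k (0,0)).2 - (gl.getD k (0,0)).1 + 1)
            (group ++ [gl.getD k (0,0)]) hc
          rw [hcast] at h1 h2 h3
          rw [hseen]
          refine ⟨?_, ?_, ?_⟩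
          · rw [h1]; simp
          · rw [h2]
          · rw [h3]
        · rw [if_neg hc, if_neg (fun hh => hc hh.2)]
          simp
      · rw [if_neg (fun hh => hi (by exact_mod_cast hh.2)),
            if_neg (fun hh => hi hh.1)]
        simp

theorem pvBTake_le (gl : List (Int × Int)) (fuel : Nat) :
    ∀ (size : Int) (i : Nat), i ≤ (pvBTake gl fuel size i).2 := by
  induction fuel with
  | zero => intro size i; simp [pvBTake]
  | succ fuel ih =>
      intro size i
      simp only [pvBTake]
      split
      · exact le_trans (Nat.le_succ i)
          (ih (size + (gl.getD i (0,0)).2 - (gl.getD i (0,0)).1 + 1) (i + 1))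
      · exact le_refl i

theorem pvBTake_le_len (gl : List (Int × Int)) (fuel : Nat) :
    ∀ (size : Int) (i : Nat), i ≤ gl.length → (pvBTake gl fuel size i).2 ≤ gl.length := by
  induction fuel with
  | zero => intro size i h; simpa [pvBTake] using h
  | succ fuel ih =>
      intro size i h
      simp only [pvBTake]
      split
      · rename_i hcond
        exact ih (size + (gl.getD i (0,0)).2 - (gl.getD i (0,0)).1 + 1) (i + 1)
          (by omega)
      · exact h

-- the outer loop: A's fold over the remaining enumerate entries, with seen_index = range(k),
-- equals the pointer loop from k
theorem outer_eq (gl : List (Int × Int)) (j k fuelB : Nat) (out : List (List (Int × Int)))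
    (hjk : j ≤ k) (hk : k ≤ gl.length) (hf : gl.length ≤ fuelB + k) :
    ((PySem.List.enumerate (gl.drop j) (j : Int)).foldl (pvAStep gl)
        (out, PySem.List.pyRange 0 (k : Int) 1)).1
      = out ++ pvBGo gl fuelB k := by
  by_cases hj : j < gl.length
  · rw [List.drop_eq_getElem_cons hj, PySem.List.enumerate_cons, List.foldl_cons]
    by_cases hjk2 : j < k
    · have hskip : pvAStep gl (out, PySem.List.pyRange 0 (k : Int) 1) ((j : Int), gl[j])
          = (out, PySem.List.pyRange 0 (k : Int) 1) := by
        unfold pvAStep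
        rw [if_pos (by simp [PySem.List.mem_pyRange_one]; omega)]
      rw [hskip, show (j : Int) + 1 = ((j + 1 : Nat) : Int) by push_cast; ring]
      exact outer_eq gl (j + 1) k fuelB out (by omega) hk hf
    · have hjk3 : j = k := by omega
      subst hjk3
      obtain ⟨fb, rfl⟩ : ∃ fb, fuelB = fb + 1 := by
        refine ⟨fuelB - 1, ?_⟩; omega
      have hgd : gl.getD j (0, 0) = gl[j] := List.getD_eq_getElem gl (0, 0) hj
      have hcast : (j : Int) + 1 = ((j + 1 : Nat) : Int) := by push_cast; ring
      have hseen : PySem.List.pyRange 0 (j : Int) 1 ++ [(j : Int)]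
          = PySem.List.pyRange 0 ((j + 1 : Nat) : Int) 1 := by
        rw [← hcast]
        exact (PySem.List.pyRange_one_succ_right (by positivity)).symm
      simp only [pvBGo]
      rw [if_pos hj]
      simp only [hgd]
      set p : Int × Int := gl[j] with hp
      by_cases hsize : p.2 - p.1 + 1 < 128
      · have hstep : pvAStep gl (out, PySem.List.pyRange 0 (j : Int) 1) ((j : Int), p)
            = (out ++ [(pvAInner gl gl.length (p.2 - p.1 + 1) [(p.1, p.2)]
                (PySem.List.pyRange 0 (j : Int) 1 ++ [(j : Int)]) ((j : Int) + 1)).1],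
               (pvAInner gl gl.length (p.2 - p.1 + 1) [(p.1, p.2)]
                (PySem.List.pyRange 0 (j : Int) 1 ++ [(j : Int)]) ((j : Int) + 1)).2.2.1) := by
          unfold pvAStep
          rw [if_neg (by simp [PySem.List.mem_pyRange_one])]
          simp only []
          rw [if_pos hsize]
        obtain ⟨h1, h2, h3⟩ := pvAInner_eq gl gl.length (j + 1) (p.2 - p.1 + 1) [(p.1, p.2)] hsize
        rw [hstep, hseen, hcast, h1, h2,
          outer_eq gl (j + 1) (pvBTake gl gl.length (p.2 - p.1 + 1) (j + 1)).2 fb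
            (out ++ [[(p.1, p.2)] ++ (pvBTake gl gl.length (p.2 - p.1 + 1) (j + 1)).1])
            (pvBTake_le gl gl.length _ (j + 1)) (pvBTake_le_len gl gl.length _ (j + 1) (by omega))
            (by have := pvBTake_le gl gl.length (p.2 - p.1 + 1) (j + 1); omega),
          if_pos hsize]
        simp
      · by_cases hbig : p.2 - p.1 + 1 > 128
        · have hstep : pvAStep gl (out, PySem.List.pyRange 0 (j : Int) 1) ((j : Int), p)
              = ((if (pvABig p.2 (p.2 - (p.1 + (128 - PySem.Int.mod p.1 128) - 1)).toNat
                      (p.1 + (128 - PySem.Int.mod p.1 128) - 1 + 1)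
                      (p.1 + (128 - PySem.Int.mod p.1 128) - 1 + 128)
                      (out ++ [[(p.1, p.1 + (128 - PySem.Int.mod p.1 128) - 1)]])).2.2 ≠ p.2
                  then (pvABig p.2 (p.2 - (p.1 + (128 - PySem.Int.mod p.1 128) - 1)).toNat
                      (p.1 + (128 - PySem.Int.mod p.1 128) - 1 + 1)
                      (p.1 + (128 - PySem.Int.mod p.1 128) - 1 + 128)
                      (out ++ [[(p.1, p.1 + (128 - PySem.Int.mod p.1 128) - 1)]])).1
                    ++ [[((pvABig p.2 (p.2 - (p.1 + (128 - PySem.Int.mod p.1 128) - 1)).toNat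
                      (p.1 + (128 - PySem.Int.mod p.1 128) - 1 + 1)
                      (p.1 + (128 - PySem.Int.mod p.1 128) - 1 + 128)
                      (out ++ [[(p.1, p.1 + (128 - PySem.Int.mod p.1 128) - 1)]])).2.1, p.2)]]
                  else (pvABig p.2 (p.2 - (p.1 + (128 - PySem.Int.mod p.1 128) - 1)).toNat
                      (p.1 + (128 - PySem.Int.mod p.1 128) - 1 + 1)
                      (p.1 + (128 - PySem.Int.mod p.1 128) - 1 + 128)
                      (out ++ [[(p.1, p.1 + (128 - PySem.Int.mod p.1 128) - 1)]])).1),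
                 PySem.List.pyRange 0 (j : Int) 1 ++ [(j : Int)]) := by
            unfold pvAStep
            rw [if_neg (by simp [PySem.List.mem_pyRange_one])]
            simp only []
            rw [if_neg hsize, if_pos hbig]
          have hm0 : 0 ≤ PySem.Int.mod p.1 128 := PySem.Int.mod_nonneg p.1 (by norm_num)
          have hml : PySem.Int.mod p.1 128 < 128 := PySem.Int.mod_lt p.1 (by norm_num)
          have efe : p.1 + (128 - PySem.Int.mod p.1 128) - 1
              = p.1 - PySem.Int.mod p.1 128 + 127 := by ring
          rw [hstep, efe]
          have hA := pvABig_eq p.2 (p.2 - (p.1 - PySem.Int.mod p.1 128 + 127)).toNat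
            (p.1 - PySem.Int.mod p.1 128 + 127 + 1)
            (out ++ [[(p.1, p.1 - PySem.Int.mod p.1 128 + 127)]]) (by omega)
          rw [show p.1 - PySem.Int.mod p.1 128 + 127 + 1 + 127
              = p.1 - PySem.Int.mod p.1 128 + 127 + 128 from by ring] at hA
          rw [hA]
          have hfold : ((PySem.List.pyRange (p.1 - PySem.Int.mod p.1 128 + 127) (p.2 + 1) 128
                ++ [p.2]).foldl
                (fun st e => (st.1 ++ [[(st.2, e)]], e + 1)) (out, p.1)).1
              = ((PySem.List.pyRange (p.1 - PySem.Int.mod p.1 128 + 127 + 128) (p.2 + 1) 128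
                ++ [p.2]).foldl
                (fun st e => (st.1 ++ [[(st.2, e)]], e + 1))
                (out ++ [[(p.1, p.1 - PySem.Int.mod p.1 128 + 127)]],
                 p.1 - PySem.Int.mod p.1 128 + 127 + 1)).1 := by
            rw [pyRange128_cons (by omega)]
            simp [List.foldl_cons]
          rw [← hfold, splitFold_append, hseen, hcast,
            outer_eq gl (j + 1) (j + 1) fb _ (le_refl _) (by omega) (by omega),
            if_neg hsize, if_pos hbig]
          unfold pvBSplit
          simp
        · have hstep : pvAStep gl (out, PySem.List.pyRange 0 (j : Int) 1) ((j : Int), p)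
              = (out ++ [[(p.1, p.2)]],
                 PySem.List.pyRange 0 (j : Int) 1 ++ [(j : Int)]) := by
            unfold pvAStep
            rw [if_neg (by simp [PySem.List.mem_pyRange_one])]
            simp only []
            rw [if_neg hsize, if_neg hbig]
          rw [hstep, hseen, hcast,
            outer_eq gl (j + 1) (j + 1) fb (out ++ [[(p.1, p.2)]]) (le_refl _) (by omega)
              (by omega),
            if_neg hsize, if_neg hbig]
          simp
  · have hj2 : j = gl.length := by omega
    have hk2 : k = gl.length := by omega
    rw [List.drop_of_length_le (by omega)]
    have hgo : pvBGo gl fuelB k = [] := by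
      cases fuelB with
      | zero => simp [pvBGo]
      | succ fb => simp only [pvBGo]; rw [if_neg (by omega)]
    rw [hgo]
    simp [PySem.List.enumerate]
termination_by gl.length - j
decreasing_by all_goals omega

-- the endpoint fold equals B's closed-form comprehension split
theorem split_eq (s fe e : Int) (h : fe ≤ e) :
    pvBSplit s (PySem.List.pyRange fe (e + 1) 128 ++ [e])
      = (([(s, fe)] ++ (PySem.List.pyRange 0 (PySem.Int.floordiv (e - fe) 128) 1).map
            (fun t => (fe + 1 + t * 128, fe + (t + 1) * 128)))
          ++ [(fe + 1 + (PySem.Int.floordiv (e - fe) 128) * 128, e)]).map (fun q => [q]) := by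
  by_cases hd : e - fe < 128
  · have hk : PySem.Int.floordiv (e - fe) 128 = 0 := by
      rw [PySem.Int.floordiv_eq_ediv_of_pos (by norm_num)]; omega
    rw [hk, pyRange128_cons (by omega), pyRange128_nil (by omega),
        PySem.List.pyRange_one_eq_nil (le_refl 0)]
    simp [pvBSplit]
  · have hk : PySem.Int.floordiv (e - fe) 128
        = PySem.Int.floordiv (e - (fe + 128)) 128 + 1 := by
      rw [PySem.Int.floordiv_eq_ediv_of_pos (by norm_num),
          PySem.Int.floordiv_eq_ediv_of_pos (by norm_num)]
      omega
    have ih := split_eq (fe + 1) (fe + 128) e (by omega)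
    rw [pyRange128_cons (by omega : fe < e + 1)]
    have hpeel : pvBSplit s ((fe :: PySem.List.pyRange (fe + 128) (e + 1) 128) ++ [e])
        = [[(s, fe)]] ++ pvBSplit (fe + 1) (PySem.List.pyRange (fe + 128) (e + 1) 128 ++ [e]) := by
      unfold pvBSplit
      simp only [List.cons_append, List.foldl_cons, List.nil_append]
      exact splitFold_append _ [[(s, fe)]] (fe + 1)
    rw [hpeel, ih, hk]
    -- shift the comprehension index by one
    have hk0 : 0 ≤ PySem.Int.floordiv (e - (fe + 128)) 128 := by
      rw [PySem.Int.floordiv_eq_ediv_of_pos (by norm_num)]; omega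
    set k' : Int := PySem.Int.floordiv (e - (fe + 128)) 128 with hk'
    have hrange : PySem.List.pyRange 0 (k' + 1) 1
        = 0 :: (PySem.List.pyRange 0 k' 1).map (fun t => t + 1) := by
      rw [PySem.List.pyRange_one, PySem.List.pyRange_one]
      have : (k' + 1 - 0).toNat = (k' - 0).toNat + 1 := by omega
      rw [this, List.range_succ_eq_map]
      simp [List.map_map, Function.comp]
    rw [hrange]
    have hmap : (PySem.List.pyRange 0 k' 1).map
          ((fun q => [q]) ∘ fun t => (fe + 128 + 1 + t * 128, fe + 128 + (t + 1) * 128))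
        = (PySem.List.pyRange 0 k' 1).map
          ((fun q => [q]) ∘ (fun t => (fe + 1 + t * 128, fe + (t + 1) * 128)) ∘ fun t => t + 1) := by
      refine List.map_congr_left fun t _ => ?_
      simp only [Function.comp]
      refine congrArg (fun x => [x]) ?_
      refine congrArg₂ _ (by ring) (by ring)
    simp only [List.map_cons, List.map_append, List.map_map, List.cons_append,
      List.nil_append]
    rw [hmap]
    refine congrArg₂ _ rfl ?_
    refine congrArg₂ _ (by norm_num) ?_
    refine congrArg₂ _ rfl ?_
    refine congrArg₂ _ ?_ rfl
    refine congrArg (fun x => [x]) ?_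
    refine congrArg (fun x => (x, e)) ?_
    ring
termination_by (e - fe).toNat
decreasing_by omega

-- absorbing into an open group in B's fold equals pvBTake
theorem foldTake (gl : List (Int × Int)) (fuel : Nat) :
    ∀ (i : Nat) (sz : Int) (out : List (List (Int × Int))) (g : List (Int × Int)),
    g ≠ [] → gl.length ≤ fuel + i →
    pvBFin ((gl.drop i).foldl pvBStep (out, g, sz))
      = pvBFin ((gl.drop (pvBTake gl fuel sz i).2).foldl pvBStep
          (out ++ [g ++ (pvBTake gl fuel sz i).1], [], 0)) := by
  induction fuel with
  | zero =>
      intro i sz out g hg hf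
      rw [List.drop_of_length_le (by omega)]
      simp [pvBTake, pvBFin, hg, List.drop_of_length_le (by omega : gl.length ≤ i)]
  | succ fuel ih =>
      intro i sz out g hg hf
      by_cases hi : i < gl.length
      · have hgd : gl.getD i (0, 0) = gl[i] := List.getD_eq_getElem gl (0, 0) hi
        rw [List.drop_eq_getElem_cons hi, List.foldl_cons]
        simp only [pvBTake, hgd]
        by_cases hc : sz + gl[i].2 - gl[i].1 + 1 < 128
        · rw [if_pos ⟨hi, hc⟩]
          have habs : sz + (gl[i].2 - gl[i].1 + 1) < 128 := by omega
          have hstep : pvBStep (out, g, sz) gl[i] = (out, g ++ [gl[i]], sz + (gl[i].2 - gl[i].1 + 1)) := by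
            simp [pvBStep, hg, habs]
          rw [hstep]
          have := ih (i + 1) (sz + (gl[i].2 - gl[i].1 + 1)) out (g ++ [gl[i]])
            (by simp) (by omega)
          rw [this]
          have harg : sz + gl[i].2 - gl[i].1 + 1 = sz + (gl[i].2 - gl[i].1 + 1) := by ring
          rw [harg]
          simp
        · rw [if_neg (fun hh => hc hh.2)]
          have hnabs : ¬ sz + (gl[i].2 - gl[i].1 + 1) < 128 := by omega
          have hstep : pvBStep (out, g, sz) gl[i] = pvBStep (out ++ [g], [], 0) gl[i] := by
            simp [pvBStep, hg, hnabs]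
          rw [hstep, ← List.foldl_cons, ← List.drop_eq_getElem_cons hi]
          simp
      · rw [List.drop_of_length_le (by omega)]
        simp only [pvBTake]
        rw [if_neg (fun hh => hi hh.1), List.drop_of_length_le (by omega : gl.length ≤ i)]
        simp [pvBFin, hg]

-- B's flat fold equals the pointer loop
theorem pvBGo_eq (gl : List (Int × Int)) (fuel : Nat) :
    ∀ (i : Nat) (out : List (List (Int × Int))), gl.length ≤ fuel + i →
    pvBFin ((gl.drop i).foldl pvBStep (out, [], 0)) = out ++ pvBGo gl fuel i := by
  induction fuel with
  | zero =>
      intro i out hf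
      rw [List.drop_of_length_le (by omega)]
      simp [pvBGo, pvBFin]
  | succ fuel ih =>
      intro i out hf
      by_cases hi : i < gl.length
      · have hgd : gl.getD i (0, 0) = gl[i] := List.getD_eq_getElem gl (0, 0) hi
        rw [List.drop_eq_getElem_cons hi, List.foldl_cons]
        simp only [pvBGo]
        rw [if_pos hi]
        simp only [hgd]
        set p : Int × Int := gl[i] with hp
        by_cases hsize : p.2 - p.1 + 1 < 128
        · have hstep : pvBStep (out, [], 0) p = (out, [p], p.2 - p.1 + 1) := by
            simp [pvBStep, hsize]
          rw [hstep,
            foldTake gl gl.length (i + 1) (p.2 - p.1 + 1) out [p] (by simp) (by omega),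
            ih (pvBTake gl gl.length (p.2 - p.1 + 1) (i + 1)).2
              (out ++ [[p] ++ (pvBTake gl gl.length (p.2 - p.1 + 1) (i + 1)).1])
              (by have := pvBTake_le gl gl.length (p.2 - p.1 + 1) (i + 1); omega),
            if_pos hsize]
          simp
        · by_cases hbig : p.2 - p.1 + 1 > 128
          · have hstep : pvBStep (out, [], 0) p
                = (out ++ (pvSplitBig p.1 p.2).map (fun q => [q]), [], 0) := by
              simp [pvBStep, hsize, hbig]
            have hm0 : 0 ≤ PySem.Int.mod p.1 128 := PySem.Int.mod_nonneg p.1 (by norm_num)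
            have hml : PySem.Int.mod p.1 128 < 128 := PySem.Int.mod_lt p.1 (by norm_num)
            have hsp : pvBSplit p.1
                (PySem.List.pyRange (p.1 - PySem.Int.mod p.1 128 + 127) (p.2 + 1) 128 ++ [p.2])
                = (pvSplitBig p.1 p.2).map (fun q => [q]) := by
              rw [split_eq p.1 (p.1 - PySem.Int.mod p.1 128 + 127) p.2 (by omega)]
              unfold pvSplitBig
              rw [show p.1 - PySem.Int.mod p.1 128 + 128 - 1
                  = p.1 - PySem.Int.mod p.1 128 + 127 from by ring]
            rw [hstep, ih (i + 1) _ (by omega), if_neg hsize, if_pos hbig, hsp]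
            simp
          · have hstep : pvBStep (out, [], 0) p = (out ++ [[p]], [], 0) := by
              simp [pvBStep, hsize, hbig]
            rw [hstep, ih (i + 1) _ (by omega), if_neg hsize, if_neg hbig]
            simp
      · rw [List.drop_of_length_le (by omega)]
        have hgo : pvBGo gl (fuel + 1) i = [] := by
          simp only [pvBGo]; rw [if_neg (by omega)]
        rw [hgo]
        simp [pvBFin]

-- ===== VERDICT (by name: the statement is the Claim_ definition above) =====
theorem merge_char_range_to_css_unicode_list_spec : Claim_equal_merge_char_range_to_css_unicode_list := by
  intro gl _
  unfold Spec_merge_char_range_to_css_unicode_list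
  unfold merge_char_range_to_css_unicode_list merge_char_range_to_css_unicode_list_alt
  have h0 : PySem.List.enumerate gl = PySem.List.enumerate (gl.drop 0) ((0 : Nat) : Int) := by
    simp
  have h1 : ([] : List Int) = PySem.List.pyRange 0 ((0 : Nat) : Int) 1 := by
    simp [PySem.List.pyRange_one_eq_nil]
  rw [h0, h1, outer_eq gl 0 0 gl.length [] (le_refl 0) (Nat.zero_le _) (by omega)]
  have h2 : gl.foldl pvBStep ([], [], 0) = (gl.drop 0).foldl pvBStep ([], [], 0) := by simp
  rw [h2, pvBGo_eq gl gl.length 0 [] (by omega)]
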